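-- pv_equiv track=rewrite | github.com/ldydek/AGH-ASD | Exams/2021-2022/1. exam/1.task.py | snow
-- ===== SOURCE A (Python) =====
-- def snow(S):
--     S.sort(reverse=True)
--     snow_quantity, ctr, index = 0, 0, 0
--     while index < len(S) and S[index] >= ctr:
--         snow_quantity += (S[index] - ctr)
--         index += 1
--         ctr += 1
--     return snow_quantity
-- ===== SOURCE B (Python) =====
-- def snow(S):
--     # Counting-bucket algorithm: no comparison sort. Only values clamped to
--     # [0, n] matter for the cutoff, so tally them in a dict and sweep the
--     # buckets from n down to 0, placing elements at consecutive indices.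
--     # (A sorts S in place; B does not mutate S -- return values agree.)
--     n = len(S)
--     vals = [v if v < n else n for v in S if v >= 0]
--     cnt = {}
--     for c in vals:
--         cnt[c] = cnt.get(c, 0) + 1
--     big = sum(v - n for v in S if v >= n)
--     total, i = 0, 0
--     for c in range(n, -1, -1):
--         t = cnt.get(c, 0)
--         u = min(t, max(0, c - i + 1))
--         total += c * u - i * u - u * (u - 1) // 2
--         i += u
--         if u < t:
--             break
--     return total + big
-- ===== Notes on version B (the rewrite author's own statement) =====
-- stated objective: alternative
-- what changed: Replaces the comparison sort + greedy prefix scan by a counting-bucket algorithm: values are clamped to [0,n] and tallied in a dict in one pass, then the buckets are swept from n down to 0, placing each bucket's elements at consecutive indices and adding its contribution in closed form; no sort is performed (B does not mutate S).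
import Mathlib
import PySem

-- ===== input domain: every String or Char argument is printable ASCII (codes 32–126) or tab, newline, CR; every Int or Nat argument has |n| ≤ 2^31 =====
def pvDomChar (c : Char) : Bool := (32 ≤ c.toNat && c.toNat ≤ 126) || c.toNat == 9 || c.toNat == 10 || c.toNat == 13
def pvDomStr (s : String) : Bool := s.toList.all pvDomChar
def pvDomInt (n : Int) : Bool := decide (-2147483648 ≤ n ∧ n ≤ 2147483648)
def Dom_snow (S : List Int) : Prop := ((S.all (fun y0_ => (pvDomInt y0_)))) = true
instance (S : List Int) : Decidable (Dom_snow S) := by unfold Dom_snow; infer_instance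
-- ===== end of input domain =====

-- B replaces A's comparison sort + greedy prefix scan by an alternative algorithm:
-- tally the values clamped to [0,n] in a dict, then sweep the buckets from n down
-- to 0, adding each bucket's contribution in closed form.
-- A sorts S in place; B does not mutate S: the equivalence proved is about the return value.

-- ===== PORT A =====
-- while index < len(S) and S[index] >= ctr: snow_quantity += S[index]-ctr; index += 1; ctr += 1
def snowLoop : List Int → Int → Int → Int
  | [], _, acc => acc
  | x :: xs, ctr, acc => if ctr ≤ x then snowLoop xs (ctr + 1) (acc + (x - ctr)) else acc

def snow (S : List Int) : Int :=
  snowLoop (PySem.List.sorted S (fun x => x) true) 0 0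

-- ===== PORT B =====
-- body of one iteration of `for c in range(n, -1, -1)`: returns (t, u, new total)
def bucketStep (cnt : PySem.Dict Int Int) (c : Nat) (i total : Int) : Int × Int × Int :=
  let t := cnt.getD (c : Int) 0
  let u := min t (max 0 ((c : Int) - i + 1))
  (t, u, total + ((c : Int) * u - i * u - PySem.Int.floordiv (u * (u - 1)) 2))

-- the countdown loop with its early `break` (if u < t) as structural recursion on c
def bucketLoop (cnt : PySem.Dict Int Int) : Nat → Int → Int → Int
  | 0, i, total => (bucketStep cnt 0 i total).2.2
  | c + 1, i, total =>
    let s := bucketStep cnt (c + 1) i total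
    if s.2.1 < s.1 then s.2.2 else bucketLoop cnt c (i + s.2.1) s.2.2

def snow_alt (S : List Int) : Int :=
  let n := S.length
  let vals := (S.filter (fun v => decide (0 ≤ v))).map (fun v => if v < (n : Int) then v else (n : Int))
  let cnt := vals.foldl (fun d c => d.insert c (d.getD c 0 + 1)) PySem.Dict.empty
  let big := ((S.filter (fun v => decide ((n : Int) ≤ v))).map (fun v => v - (n : Int))).sum
  bucketLoop cnt n 0 0 + big

-- ===== PRECONDITION & SPEC =====
def Spec_snow (S : List Int) (out : Int) : Prop := out = snow_alt S
instance (S : List Int) (out : Int) : Decidable (Spec_snow S out) := by unfold Spec_snow; infer_instance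

-- ===== CLAIM (what is proved, stated in full; the proofs are below) =====
def Claim_equal_snow : Prop := ∀ (S : List Int), Dom_snow S → Spec_snow S (snow S)

-- ===== LEMMAS AND PROOFS =====

-- triangular numbers 0 + 1 + … + (m-1)
def tri : Nat → Int
  | 0 => 0
  | m + 1 => tri m + m

lemma tri_mul (m : Nat) : (m : Int) * ((m : Int) - 1) = 2 * tri m := by
  induction m with
  | zero => simp [tri]
  | succ k ih =>
    simp only [tri]
    push_cast
    nlinarith [ih]

lemma floordiv_tri_nat (m : Nat) : PySem.Int.floordiv ((m : Int) * ((m : Int) - 1)) 2 = tri m := by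
  rw [tri_mul, PySem.Int.floordiv_eq_ediv_of_pos (by norm_num)]
  omega

lemma floordiv_tri (u : Int) (hu : 0 ≤ u) :
    PySem.Int.floordiv (u * (u - 1)) 2 = tri u.toNat := by
  obtain ⟨m, rfl⟩ : ∃ m : Nat, u = (m : Int) := ⟨u.toNat, by omega⟩
  rw [tri_mul, PySem.Int.floordiv_eq_ediv_of_pos (by norm_num), Int.toNat_natCast]
  omega

lemma snowLoop_neg (R : List Int) (i acc : Int) (h0 : 0 ≤ i)
    (hneg : ∀ x ∈ R, x < 0) : snowLoop R i acc = acc := by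
  cases R with
  | nil => rfl
  | cons x xs =>
    have hx : x < 0 := hneg x (by simp)
    simp only [snowLoop]
    rw [if_neg (by omega)]

lemma snowLoop_all_ge (P : List Int) : ∀ (R : List Int) (i acc : Int),
    (∀ x ∈ P, i + P.length - 1 ≤ x) →
    snowLoop (P ++ R) i acc
      = snowLoop R (i + P.length) (acc + P.sum - ((P.length : Int) * i + tri P.length)) := by
  induction P with
  | nil =>
    intro R i acc _
    simp [tri]
  | cons x P ih =>
    intro R i acc h
    have hx : i ≤ x := by
      have := h x (by simp)
      simp only [List.length_cons] at this
      push_cast at this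
      omega
    simp only [List.cons_append, snowLoop]
    rw [if_pos hx]
    rw [ih R (i + 1) (acc + (x - i)) ?side]
    case side =>
      intro y hy
      have := h y (by simp [hy])
      simp only [List.length_cons] at this ⊢
      push_cast at this ⊢
      omega
    have e1 : i + 1 + (P.length : Int) = i + ((x :: P).length : Int) := by
      simp only [List.length_cons]; push_cast; ring
    have e2 : acc + (x - i) + P.sum - ((P.length : Int) * (i + 1) + tri P.length)
        = acc + (x :: P).sum - (((x :: P).length : Int) * i + tri (x :: P).length) := by
      simp only [List.sum_cons, List.length_cons, tri]
      push_cast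
      ring
    rw [e1, e2]

lemma snowLoop_replicate_stop (t : Nat) : ∀ (c : Int) (R : List Int) (i acc : Int),
    0 ≤ i → max 0 (c - i + 1) < t →
    snowLoop (List.replicate t c ++ R) i acc
      = acc + c * max 0 (c - i + 1) - i * max 0 (c - i + 1) - tri (max 0 (c - i + 1)).toNat := by
  induction t with
  | zero =>
    intro c R i acc _ hlt
    have h1 : (0 : Int) ≤ max 0 (c - i + 1) := le_max_left _ _
    exact absurd hlt (by push_cast; omega)
  | succ t ih =>
    intro c R i acc h0 hlt
    simp only [List.replicate_succ, List.cons_append, snowLoop]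
    by_cases hc : i ≤ c
    · rw [if_pos hc]
      have hmax : max 0 (c - i + 1) = c - i + 1 := max_eq_right (by omega)
      have hmax' : max 0 (c - (i + 1) + 1) = c - i := by
        rw [max_eq_right (show (0:Int) ≤ c - (i + 1) + 1 by omega)]; ring
      rw [ih c R (i + 1) (acc + (c - i)) (by omega) ?side]
      case side =>
        rw [hmax']
        rw [hmax] at hlt
        push_cast at hlt ⊢
        omega
      rw [hmax, hmax']
      have hm : (c - i + 1).toNat = (c - i).toNat + 1 := by omega
      rw [hm]
      simp only [tri]
      have hcast : (((c - i).toNat : Nat) : Int) = c - i := by omega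
      rw [hcast]
      ring
    · rw [if_neg hc]
      have hmax : max 0 (c - i + 1) = 0 := max_eq_left (by omega)
      rw [hmax]
      simp [tri]

-- a descending-sorted list whose elements are all ≤ c starts with its copies of c
lemma sorted_desc_split (R : List Int) (c : Int)
    (hs : R.Pairwise (fun a b => b ≤ a)) (hle : ∀ x ∈ R, x ≤ c) :
    ∃ Q, R = List.replicate (R.count c) c ++ Q ∧ Q.Pairwise (fun a b => b ≤ a) ∧ ∀ x ∈ Q, x < c := by
  induction R with
  | nil => exact ⟨[], by simp⟩
  | cons x R ih =>
    rw [List.pairwise_cons] at hs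
    by_cases hx : x = c
    · subst hx
      obtain ⟨Q, hQ, hQs, hQlt⟩ := ih hs.2 (fun y hy => hle y (List.mem_cons_of_mem _ hy))
      refine ⟨Q, ?_, hQs, hQlt⟩
      rw [List.count_cons_self, List.replicate_succ, List.cons_append]
      exact congrArg _ hQ
    · have hxc : x < c := lt_of_le_of_ne (hle x (by simp)) hx
      have hcnt : (x :: R).count c = 0 := by
        rw [List.count_eq_zero]
        intro hmem
        rcases List.mem_cons.mp hmem with h | h
        · exact hx h.symm
        · have := hs.1 c h
          omega
      refine ⟨x :: R, by simp [hcnt], List.pairwise_cons.mpr hs, fun y hy => ?_⟩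
      rcases List.mem_cons.mp hy with h | h
      · omega
      · have := hs.1 y h
        omega

lemma pv_add_shuffle (a d K : Int) : a + d + K = a + K + d := by ring

lemma bucketLoop_add (cnt : PySem.Dict Int Int) : ∀ (c : Nat) (i a d : Int),
    bucketLoop cnt c i (a + d) = bucketLoop cnt c i a + d := by
  intro c
  induction c with
  | zero => intro i a d; simp only [bucketLoop, bucketStep]; ring
  | succ c ih =>
    intro i a d
    simp only [bucketLoop, bucketStep]
    split_ifs
    · ring
    · rw [pv_add_shuffle a d, ih]

-- main invariant: the greedy scan over the remaining descending suffix equals the bucket sweep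
lemma bucket_main (cnt : PySem.Dict Int Int) : ∀ (c : Nat) (R : List Int) (i total : Int),
    0 ≤ i →
    R.Pairwise (fun a b => b ≤ a) →
    (∀ x ∈ R, x ≤ (c : Int)) →
    (∀ c' : Nat, c' ≤ c → cnt.getD (c' : Int) 0 = (R.count (c' : Int) : Int)) →
    snowLoop R i total = bucketLoop cnt c i total := by
  intro c
  induction c with
  | zero =>
    intro R i total h0 hs hle hcnt
    have hc : cnt.getD ((0 : Nat) : Int) 0 = (R.count ((0 : Nat) : Int) : Int) := hcnt 0 le_rfl
    push_cast at hc hle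
    obtain ⟨Q, hsplit, hQs, hQlt⟩ := sorted_desc_split R 0 hs hle
    have h0t : (0 : Int) ≤ cnt.getD 0 0 := by rw [hc]; exact Int.natCast_nonneg _
    have hX1 : (0 : Int) ≤ max 0 ((0 : Int) - i + 1) := le_max_left _ _
    have hX3 := max_choice (0 : Int) ((0 : Int) - i + 1)
    have h0u : (0 : Int) ≤ min (cnt.getD 0 0) (max 0 ((0 : Int) - i + 1)) := le_min h0t hX1
    simp only [bucketLoop, bucketStep, Nat.cast_zero]
    by_cases hu : min (cnt.getD 0 0) (max 0 ((0 : Int) - i + 1)) < cnt.getD 0 0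
    · -- the scan stops inside bucket 0
      have hXu : min (cnt.getD 0 0) (max 0 ((0 : Int) - i + 1)) = max 0 ((0 : Int) - i + 1) := by
        rcases min_choice (cnt.getD 0 0) (max 0 ((0 : Int) - i + 1)) with h | h <;> omega
      rw [hsplit, snowLoop_replicate_stop (R.count 0) 0 Q i total h0 (by rw [← hc, ← hXu]; exact hu)]
      rw [floordiv_tri _ h0u, hXu]
      ring
    · -- all of bucket 0 is taken, then the loop ends
      have hut : min (cnt.getD 0 0) (max 0 ((0 : Int) - i + 1)) = cnt.getD 0 0 := by
        rcases min_choice (cnt.getD 0 0) (max 0 ((0 : Int) - i + 1)) with h | h <;> omega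
      have hle' : cnt.getD 0 0 ≤ max 0 ((0 : Int) - i + 1) := hut ▸ min_le_right _ _
      rw [hsplit, snowLoop_all_ge (List.replicate (R.count 0) 0) Q i total ?pass]
      case pass =>
        intro x hx
        obtain ⟨hne, hx0⟩ := List.mem_replicate.mp hx
        subst hx0
        rw [List.length_replicate]
        rcases hX3 with h | h <;> omega
      rw [snowLoop_neg Q _ _ (by positivity) hQlt]
      rw [hut, hc, floordiv_tri_nat]
      simp only [List.length_replicate, List.sum_replicate, smul_zero]
      ring
  | succ c' ih =>
    intro R i total h0 hs hle hcnt
    have hc : cnt.getD ((c' + 1 : Nat) : Int) 0 = (R.count ((c' + 1 : Nat) : Int) : Int) :=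
      hcnt (c' + 1) le_rfl
    obtain ⟨Q, hsplit, hQs, hQlt⟩ := sorted_desc_split R ((c' + 1 : Nat) : Int) hs hle
    have h0t : (0 : Int) ≤ cnt.getD ((c' + 1 : Nat) : Int) 0 := by
      rw [hc]; exact Int.natCast_nonneg _
    have hX1 : (0 : Int) ≤ max 0 (((c' + 1 : Nat) : Int) - i + 1) := le_max_left _ _
    have hX3 := max_choice (0 : Int) (((c' + 1 : Nat) : Int) - i + 1)
    have h0u : (0 : Int) ≤ min (cnt.getD ((c' + 1 : Nat) : Int) 0)
        (max 0 (((c' + 1 : Nat) : Int) - i + 1)) := le_min h0t hX1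
    simp only [bucketLoop, bucketStep]
    by_cases hu : min (cnt.getD ((c' + 1 : Nat) : Int) 0)
        (max 0 (((c' + 1 : Nat) : Int) - i + 1)) < cnt.getD ((c' + 1 : Nat) : Int) 0
    · -- the scan stops inside this bucket: both sides return here
      rw [if_pos hu]
      have hXu : min (cnt.getD ((c' + 1 : Nat) : Int) 0) (max 0 (((c' + 1 : Nat) : Int) - i + 1))
          = max 0 (((c' + 1 : Nat) : Int) - i + 1) := by
        rcases min_choice (cnt.getD ((c' + 1 : Nat) : Int) 0)
          (max 0 (((c' + 1 : Nat) : Int) - i + 1)) with h | h <;> omega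
      rw [hsplit, snowLoop_replicate_stop (R.count ((c' + 1 : Nat) : Int)) _ Q i total h0
        (by rw [← hc, ← hXu]; exact hu)]
      rw [floordiv_tri _ h0u, hXu]
      ring
    · -- the whole bucket is taken; recurse on the next bucket
      rw [if_neg hu]
      have hut : min (cnt.getD ((c' + 1 : Nat) : Int) 0) (max 0 (((c' + 1 : Nat) : Int) - i + 1))
          = cnt.getD ((c' + 1 : Nat) : Int) 0 := by
        rcases min_choice (cnt.getD ((c' + 1 : Nat) : Int) 0)
          (max 0 (((c' + 1 : Nat) : Int) - i + 1)) with h | h <;> omega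
      have hle' : cnt.getD ((c' + 1 : Nat) : Int) 0 ≤ max 0 (((c' + 1 : Nat) : Int) - i + 1) :=
        hut ▸ min_le_right _ _
      rw [hsplit, snowLoop_all_ge (List.replicate (R.count ((c' + 1 : Nat) : Int))
        ((c' + 1 : Nat) : Int)) Q i total ?pass]
      case pass =>
        intro x hx
        obtain ⟨hne, hx0⟩ := List.mem_replicate.mp hx
        subst hx0
        rw [List.length_replicate]
        rcases hX3 with h | h
        · rw [hc] at hle'
          rw [h] at hle'
          omega
        · rw [hc] at hle'
          rw [h] at hle'
          omega
      rw [hut, hc, floordiv_tri_nat]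
      simp only [List.length_replicate, List.sum_replicate, nsmul_eq_mul]
      have eacc : total + (R.count ((c' + 1 : Nat) : Int) : Int) * ((c' + 1 : Nat) : Int)
            - ((R.count ((c' + 1 : Nat) : Int) : Int) * i + tri (R.count ((c' + 1 : Nat) : Int)))
          = total + (((c' + 1 : Nat) : Int) * (R.count ((c' + 1 : Nat) : Int) : Int)
            - i * (R.count ((c' + 1 : Nat) : Int) : Int) - tri (R.count ((c' + 1 : Nat) : Int))) := by
        ring
      rw [eacc]
      apply ih Q (i + (R.count ((c' + 1 : Nat) : Int) : Int)) _ (by positivity) hQs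
      · intro x hx
        have := hQlt x hx
        push_cast at this ⊢
        omega
      · intro d hd
        have hcd := hcnt d (Nat.le_succ_of_le hd)
        rw [hsplit, List.count_append, List.count_replicate] at hcd
        rw [if_neg (by
          simp only [beq_iff_eq, Nat.cast_inj]
          omega)] at hcd
        simpa using hcd

-- in a descending-sorted list, everything after the ≥ b prefix is < b
lemma dropWhile_desc_lt (R : List Int) (b : Int) (hs : R.Pairwise (fun a b => b ≤ a)) :
    ∀ x ∈ R.dropWhile (fun x => decide (b ≤ x)), x < b := by
  induction R with
  | nil => simp
  | cons y R ih =>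
    rw [List.pairwise_cons] at hs
    intro x hx
    rw [List.dropWhile_cons] at hx
    split_ifs at hx with hy
    · exact ih hs.2 x hx
    · simp only [decide_eq_true_eq, not_le] at hy
      rcases List.mem_cons.mp hx with h | h
      · omega
      · have := hs.1 x h
        omega

lemma sum_map_sub_const (l : List Int) (a : Int) :
    (l.map (fun v => v - a)).sum = l.sum - l.length * a := by
  induction l with
  | nil => simp
  | cons x xs ih =>
    simp only [List.map_cons, List.sum_cons, List.length_cons, ih]
    push_cast
    ring

-- counting a value below the clamp bound in the clamped list is counting it in S
lemma vals_count_small (S : List Int) (d : Int) (h0 : 0 ≤ d) (hd : d < (S.length : Int)) :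
    ((S.filter (fun v => decide (0 ≤ v))).map
      (fun v => if v < (S.length : Int) then v else (S.length : Int))).count d = S.count d := by
  rw [List.count_eq_countP, List.countP_map, List.countP_filter, List.count_eq_countP]
  apply List.countP_congr
  intro v _
  simp only [Function.comp_apply, Bool.and_eq_true, beq_iff_eq, decide_eq_true_eq]
  by_cases hvn : v < (S.length : Int)
  · rw [if_pos hvn]
    constructor
    · rintro ⟨h, _⟩; exact h
    · intro h; exact ⟨h, by omega⟩
  · rw [if_neg hvn]
    constructor
    · rintro ⟨h, _⟩; omega
    · intro h; omega

-- counting the clamp value itself counts the elements ≥ len S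
lemma vals_count_top (S : List Int) (h : 0 < S.length) :
    ((S.filter (fun v => decide (0 ≤ v))).map
      (fun v => if v < (S.length : Int) then v else (S.length : Int))).count (S.length : Int)
      = S.countP (fun v => decide ((S.length : Int) ≤ v)) := by
  rw [List.count_eq_countP, List.countP_map, List.countP_filter]
  apply List.countP_congr
  intro v _
  simp only [Function.comp_apply, Bool.and_eq_true, beq_iff_eq, decide_eq_true_eq]
  by_cases hvn : v < (S.length : Int)
  · rw [if_pos hvn]
    constructor
    · rintro ⟨h', _⟩; omega
    · intro h'; omega
  · rw [if_neg hvn]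
    constructor
    · rintro _; omega
    · intro h'
      refine ⟨rfl, by omega⟩

-- ===== VERDICT (by name: the statement is the Claim_ definition above) =====
theorem snow_spec : Claim_equal_snow := by
  unfold Claim_equal_snow
  intro S _
  unfold Spec_snow snow snow_alt
  dsimp only
  rcases hS : S.length with _ | m
  · -- empty list
    have : S = [] := List.length_eq_zero_iff.mp hS
    subst this
    decide
  · -- S.length = m + 1
    have hperm : (PySem.List.sorted S (fun x => x) true).Perm S :=
      PySem.List.sorted_perm S (fun x => x) true
    have hsorted : (PySem.List.sorted S (fun x => x) true).Pairwise (fun a b => b ≤ a) := by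
      simpa using PySem.List.sorted_pairwise_rev (xs := S) (key := fun x => x)
    set T := PySem.List.sorted S (fun x => x) true with hT
    set p := fun x : Int => decide (((m + 1 : Nat) : Int) ≤ x) with hp
    set P := T.takeWhile p with hPdef
    set Q := T.dropWhile p with hQdef
    have hPQ : P ++ Q = T := List.takeWhile_append_dropWhile
    have hP : ∀ x ∈ P, ((m + 1 : Nat) : Int) ≤ x := by
      intro x hx
      have := List.mem_takeWhile_imp hx
      rw [hp] at this
      exact of_decide_eq_true this
    have hQlt : ∀ x ∈ Q, x < ((m + 1 : Nat) : Int) :=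
      dropWhile_desc_lt T ((m + 1 : Nat) : Int) hsorted
    have hQs : Q.Pairwise (fun a b => b ≤ a) :=
      hsorted.sublist (List.dropWhile_sublist _)
    have hTlen : T.length = S.length := hperm.length_eq
    have hPlen : P.length ≤ m + 1 := by
      have h1 := (List.takeWhile_sublist (l := T) (p := p)).length_le
      rw [← hPdef] at h1
      omega
    have hfilterT : T.filter p = P := by
      rw [← hPQ, List.filter_append]
      rw [List.filter_eq_self.mpr (fun x hx => by rw [hp]; exact decide_eq_true (hP x hx))]
      rw [List.filter_eq_nil_iff.mpr (fun x hx => by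
        rw [hp]; simpa using not_le.mpr (hQlt x hx)), List.append_nil]
    have hfperm : (S.filter p).Perm P := by
      rw [← hfilterT]
      exact (hperm.filter p).symm
    have hsumP : (S.filter p).sum = P.sum := hfperm.sum_eq
    have hlenP : (S.filter p).length = P.length := hfperm.length_eq
    have hcountPp : S.countP p = P.length := by
      rw [List.countP_eq_length_filter, hlenP]
    have hcount_small : ∀ d : Nat, d ≤ m →
        ((S.filter (fun v => decide (0 ≤ v))).map
          (fun v => if v < ((m + 1 : Nat) : Int) then v else ((m + 1 : Nat) : Int))).count (d : Int)
          = Q.count (d : Int) := by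
      intro d hd
      have h := vals_count_small S d (by positivity) (by rw [hS]; push_cast; omega)
      rw [hS] at h
      rw [h]
      have h1 : S.count (d : Int) = T.count (d : Int) := (hperm.count_eq _).symm
      have h2 : T.count (d : Int) = P.count (d : Int) + Q.count (d : Int) := by
        rw [← hPQ, List.count_append]
      have h3 : P.count (d : Int) = 0 := by
        rw [List.count_eq_zero]
        intro hmem
        have := hP _ hmem
        push_cast at this
        omega
      omega
    have htop : ((S.filter (fun v => decide (0 ≤ v))).map
        (fun v => if v < ((m + 1 : Nat) : Int) then v else ((m + 1 : Nat) : Int))).count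
          ((m + 1 : Nat) : Int) = P.length := by
      have h := vals_count_top S (by omega)
      rw [hS] at h
      rw [← hp] at h
      rw [h, hcountPp]
    simp only [bucketLoop, bucketStep, PySem.Dict.getD_foldl_insert_add_one,
      PySem.Dict.getD_empty, zero_add]
    rw [htop]
    have hmr := le_max_right (0 : Int) (((m + 1 : Nat) : Int) - 0 + 1)
    have hut : min ((P.length : Nat) : Int) (max 0 (((m + 1 : Nat) : Int) - 0 + 1))
        = ((P.length : Nat) : Int) := min_eq_left (by push_cast at hmr ⊢; omega)
    rw [hut, if_neg (lt_irrefl _)]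
    set cnt := (List.foldl (fun d c => d.insert c (d.getD c 0 + 1)) (PySem.Dict.empty : PySem.Dict Int Int)
      (List.map (fun v => if v < ((m + 1 : Nat) : Int) then v else ((m + 1 : Nat) : Int))
        (List.filter (fun v => decide (0 ≤ v)) S))) with hcntdef
    rw [show T = P ++ Q from hPQ.symm]
    rw [snowLoop_all_ge P Q 0 0 (fun x hx => by
      have h1 := hP x hx
      push_cast at h1 ⊢
      omega)]
    rw [zero_add ((P.length : Nat) : Int)]
    rw [bucket_main cnt m Q ((P.length : Int))
      (0 + P.sum - ((P.length : Int) * 0 + tri P.length)) (by positivity) hQs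
      (fun x hx => by have := hQlt x hx; push_cast at this ⊢; omega)
      (fun d hd => by
        rw [hcntdef]
        simp only [PySem.Dict.getD_foldl_insert_add_one, PySem.Dict.getD_empty, zero_add]
        exact_mod_cast hcount_small d hd)]
    have hbig : ((S.filter p).map (fun v => v - ((m + 1 : Nat) : Int))).sum
        = P.sum - ((m + 1 : Nat) : Int) * (P.length : Int) := by
      rw [sum_map_sub_const, hsumP, hlenP]
      ring
    rw [show (0 : Int) + P.sum - ((P.length : Int) * 0 + tri P.length)
        = ((((m + 1 : Nat) : Int) * (P.length : Int) - 0 * (P.length : Int)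
            - PySem.Int.floordiv ((P.length : Int) * ((P.length : Int) - 1)) 2))
          + ((S.filter p).map (fun v => v - ((m + 1 : Nat) : Int))).sum from by
      rw [hbig, floordiv_tri_nat]
      ring]
    rw [bucketLoop_add]
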